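-- pv_equiv track=rewrite | github.com/Matthew15625/Encryption | Encryption.py | splitIntoFives
-- ===== SOURCE A (Python) =====
-- def splitIntoFives(message):
--     noSpaces = message.replace(" ", "")
--     noSpaces = list(noSpaces)
--     length = len(noSpaces)
--     splitMessage = ""
--     for i in range(length):
--         if i % 5 == 0:
--             if i != 0:
--                 splitMessage += " "
--         splitMessage += noSpaces[i]
--     return splitMessage
-- ===== SOURCE B (Python) =====
-- def splitIntoFives(message):
--     s = message.replace(" ", "")
--     blocks = []
--     for i in range(0, len(s), 5):
--         blocks.append(s[i:i+5])
--     return " ".join(blocks)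
-- ===== Notes on version B (the rewrite author's own statement) =====
-- stated objective: simpler
-- what changed: B strips the spaces once and then slices the stripped string into whole 5-character blocks joined with a space separator, instead of A's per-character loop with a modulo test inserting separators into a growing string.
import Mathlib
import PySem

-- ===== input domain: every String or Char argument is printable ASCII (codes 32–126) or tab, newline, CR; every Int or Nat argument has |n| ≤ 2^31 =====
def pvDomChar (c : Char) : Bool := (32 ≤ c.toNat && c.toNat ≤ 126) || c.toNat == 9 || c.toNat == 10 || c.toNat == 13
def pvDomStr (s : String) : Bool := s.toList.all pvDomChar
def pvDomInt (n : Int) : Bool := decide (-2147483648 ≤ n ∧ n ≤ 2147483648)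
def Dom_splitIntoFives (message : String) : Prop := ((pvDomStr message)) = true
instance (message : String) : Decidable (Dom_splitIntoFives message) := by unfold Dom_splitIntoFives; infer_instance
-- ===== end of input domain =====

-- B regroups the non-space characters by slicing whole 5-character blocks and joining them,
-- instead of A's per-character loop with a modulo separator test (objective: simpler).

-- ===== PORT A =====
def splitIntoFives (message : String) : String :=
  let noSpaces : List Char := (PySem.Str.replace message " " "").toList
  let length : Int := noSpaces.length
  String.ofList <|
    (PySem.List.pyRange 0 length 1).foldl
      (fun splitMessage i =>
        (if PySem.Int.mod i 5 = 0 then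
           (if i ≠ 0 then splitMessage ++ [' '] else splitMessage)
         else splitMessage) ++ [PySem.List.pyGetD noSpaces i ' ']) []

-- ===== PORT B =====
def splitIntoFives_alt (message : String) : String :=
  let s : List Char := (PySem.Str.replace message " " "").toList
  let blocks : List (List Char) :=
    (PySem.List.pyRange 0 s.length 5).map
      (fun i => PySem.List.slice s (some i) (some (i + 5)))
  String.ofList (PySem.Chars.join [' '] blocks)

-- ===== PRECONDITION & SPEC =====
def Spec_splitIntoFives (message : String) (out : String) : Prop := out = splitIntoFives_alt message
instance (message : String) (out : String) : Decidable (Spec_splitIntoFives message out) := by unfold Spec_splitIntoFives; infer_instance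

-- ===== CLAIM (what is proved, stated in full; the proofs are below) =====
def Claim_equal_splitIntoFives : Prop := ∀ (message : String), Dom_splitIntoFives message → Spec_splitIntoFives message (splitIntoFives message)

-- ===== LEMMAS AND PROOFS =====

-- the stripped characters with a space inserted before every index divisible by 5 (except 0)
def sepFrom : Nat → List Char → List Char
  | _, [] => []
  | a, c :: rest => (if a % 5 = 0 ∧ a ≠ 0 then [' '] else []) ++ c :: sepFrom (a + 1) rest

-- the stripped characters cut into successive blocks of (at most) five
def chunks5 : List Char → List (List Char)
  | [] => []
  | c :: rest => (c :: rest).take 5 :: chunks5 ((c :: rest).drop 5)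
termination_by l => l.length
decreasing_by simp

theorem chunks5_nil : chunks5 [] = [] := by unfold chunks5; rfl

theorem chunks5_cons (c : Char) (rest : List Char) :
    chunks5 (c :: rest) = (c :: rest).take 5 :: chunks5 ((c :: rest).drop 5) := by
  conv_lhs => unfold chunks5

-- A's fold emits sepFrom
theorem foldA (l : List Char) (k : Nat) : ∀ (a : Nat) (acc : List Char), l.length - a ≤ k →
    (PySem.List.pyRange (a : Int) (l.length : Int) 1).foldl
      (fun splitMessage i =>
        (if PySem.Int.mod i 5 = 0 then
           (if i ≠ 0 then splitMessage ++ [' '] else splitMessage)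
         else splitMessage) ++ [PySem.List.pyGetD l i ' ']) acc
    = acc ++ sepFrom a (l.drop a) := by
  induction k with
  | zero =>
    intro a acc h
    have ha : l.length ≤ a := by omega
    rw [PySem.List.pyRange_one_eq_nil (by exact_mod_cast ha)]
    simp [List.drop_of_length_le ha, sepFrom]
  | succ k ih =>
    intro a acc h
    by_cases ha : l.length ≤ a
    · rw [PySem.List.pyRange_one_eq_nil (by exact_mod_cast ha)]
      simp [List.drop_of_length_le ha, sepFrom]
    · have ha' : a < l.length := by omega
      rw [PySem.List.pyRange_one_cons (by exact_mod_cast ha')]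
      rw [List.foldl_cons]
      have hstep : ((a : Int) + 1) = ((a + 1 : Nat) : Int) := by push_cast; ring
      rw [hstep, ih (a + 1) _ (by omega)]
      rw [List.drop_eq_getElem_cons ha']
      simp only [sepFrom]
      have hget : PySem.List.pyGetD l (a : Int) ' ' = l[a] := by
        rw [PySem.List.pyGetD_natCast]
        exact List.getD_eq_getElem l ' ' ha'
      have hmod : PySem.Int.mod (a : Int) 5 = ((a % 5 : Nat) : Int) := by
        exact_mod_cast PySem.Int.mod_natCast a 5
      rw [hget, hmod]
      by_cases h5 : a % 5 = 0
      · by_cases h0 : a = 0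
        · subst h0; simp
        · have hz : (a : Int) ≠ 0 := by exact_mod_cast h0
          have hdv : (5 : Int) ∣ (a : Int) := by omega
          simp [h5, h0, hz, hdv]
      · have hnd : ¬ (5 : Int) ∣ (a : Int) := by omega
        have hndn : ¬ 5 ∣ a := by omega
        simp [h5, hnd, hndn]

-- one block step of sepFrom: at a multiple of five, a (possibly leading-space) block of
-- five characters is emitted and the loop continues five positions later
theorem sepFrom_block (xs : List Char) (a : Nat) (hd : 5 ∣ a) :
    sepFrom a xs = (if xs = [] ∨ a = 0 then [] else [' ']) ++ xs.take 5 ++ sepFrom (a + 5) (xs.drop 5) := by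
  obtain ⟨q, rfl⟩ := hd
  have h1 : (5 * q + 1) % 5 ≠ 0 := by omega
  have h2 : (5 * q + 1 + 1) % 5 ≠ 0 := by omega
  have h3 : (5 * q + 1 + 1 + 1) % 5 ≠ 0 := by omega
  have h4 : (5 * q + 1 + 1 + 1 + 1) % 5 ≠ 0 := by omega
  have h0 : (5 * q) % 5 = 0 := by omega
  match xs with
  | [] => simp [sepFrom]
  | [c0] => by_cases hq : q = 0 <;> simp [sepFrom, h1, h0, hq]
  | [c0, c1] => by_cases hq : q = 0 <;> simp [sepFrom, h1, h2, h0, hq]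
  | [c0, c1, c2] => by_cases hq : q = 0 <;> simp [sepFrom, h1, h2, h3, h0, hq]
  | [c0, c1, c2, c3] => by_cases hq : q = 0 <;> simp [sepFrom, h1, h2, h3, h4, h0, hq]
  | c0 :: c1 :: c2 :: c3 :: c4 :: rest =>
    by_cases hq : q = 0 <;>
      simp [sepFrom, h1, h2, h3, h4, h0, hq, Nat.add_assoc]

-- chunks5 is never empty on a non-empty list
theorem chunks5_ne_nil (xs : List Char) (h : xs ≠ []) : chunks5 xs ≠ [] := by
  match xs with
  | c :: rest => simp [chunks5]

-- joining the chunks with a space is sepFrom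
theorem join_chunks (k : Nat) : ∀ (xs : List Char) (a : Nat), xs.length ≤ k → 5 ∣ a →
    sepFrom a xs = (if xs = [] ∨ a = 0 then [] else [' ']) ++ PySem.Chars.join [' '] (chunks5 xs) := by
  induction k with
  | zero =>
    intro xs a h _
    have : xs = [] := List.eq_nil_of_length_eq_zero (by omega)
    subst this; simp [sepFrom, chunks5_nil, PySem.Chars.join_nil]
  | succ k ih =>
    intro xs a h hd
    match xs with
    | [] => simp [sepFrom, chunks5_nil, PySem.Chars.join_nil]
    | c :: rest =>
      rw [sepFrom_block (c :: rest) a hd]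
      have hdrop : (c :: rest).drop 5 = rest.drop 4 := by simp
      by_cases hr : (c :: rest).drop 5 = []
      · rw [hr]
        have hc0 : chunks5 ((c :: rest).drop 5) = [] := by rw [hr, chunks5_nil]
        rw [chunks5_cons, hc0, PySem.Chars.join_singleton]
        simp [sepFrom, hr]
      · have hlen : ((c :: rest).drop 5).length ≤ k := by
          simp only [List.length_drop, List.length_cons] at *; omega
        rw [ih ((c :: rest).drop 5) (a + 5) hlen (by omega)]
        have hne : chunks5 ((c :: rest).drop 5) ≠ [] := chunks5_ne_nil _ hr
        obtain ⟨t, r, ht⟩ := List.exists_cons_of_ne_nil hne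
        rw [chunks5_cons]
        simp only [ht, PySem.Chars.join_cons_cons]
        have h4 : ¬ rest.length ≤ 4 := by
          simp [List.drop_eq_nil_iff] at hr; omega
        simp [h4]

-- B's blocks are chunks5
theorem blocks_eq (l : List Char) (k : Nat) : ∀ (a : Nat), l.length - a ≤ k →
    (PySem.List.pyRange (a : Int) (l.length : Int) 5).map
      (fun i => PySem.List.slice l (some i) (some (i + 5)))
    = chunks5 (l.drop a) := by
  induction k with
  | zero =>
    intro a h
    have ha : l.length ≤ a := by omega
    rw [PySem.List.pyRange_of_pos _ _ (by norm_num)]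
    rw [if_neg (by exact_mod_cast not_lt.mpr ha)]
    simp [List.drop_of_length_le ha, chunks5_nil]
  | succ k ih =>
    intro a h
    by_cases ha : l.length ≤ a
    · rw [PySem.List.pyRange_of_pos _ _ (by norm_num)]
      rw [if_neg (by exact_mod_cast not_lt.mpr ha)]
      simp [List.drop_of_length_le ha, chunks5_nil]
    · have ha' : a < l.length := by omega
      -- cons step for a step-5 range
      have hcons : PySem.List.pyRange (a : Int) (l.length : Int) 5
          = (a : Int) :: PySem.List.pyRange ((a + 5 : Nat) : Int) (l.length : Int) 5 := by
        rw [PySem.List.pyRange_of_pos _ _ (by norm_num : (0:Int) < 5),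
            PySem.List.pyRange_of_pos _ _ (by norm_num : (0:Int) < 5)]
        rw [if_pos (by exact_mod_cast ha')]
        have hn : (((l.length : Int) - a + 5 - 1) / 5).toNat
            = (if ((a + 5 : Nat) : Int) < (l.length : Int) then
                (((l.length : Int) - ((a + 5 : Nat) : Int) + 5 - 1) / 5).toNat else 0) + 1 := by
          split_ifs with hlt
          · have hlt' : a + 5 < l.length := by exact_mod_cast hlt
            push_cast; omega
          · have hge : l.length ≤ a + 5 := by
              by_contra hc
              exact hlt (by exact_mod_cast (by omega : ((a:Int) + 5) < (l.length : Int)) )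
            push_cast; omega
        rw [hn, List.range_succ_eq_map, List.map_cons, List.map_map]
        simp only [List.cons.injEq]
        refine ⟨by simp, List.map_congr_left fun x _ => by
          simp only [Function.comp_apply]; push_cast; ring⟩
      rw [hcons, List.map_cons, ih (a + 5) (by omega)]
      have hslice : PySem.List.slice l (some (a : Int)) (some ((a : Int) + 5))
          = (l.drop a).take 5 := by
        have : ((a : Int) + 5) = ((a : Int) + ((5 : Nat) : Int)) := by norm_num
        rw [this, PySem.List.slice_natCast_add]
      rw [hslice]
      rw [List.drop_eq_getElem_cons ha', chunks5_cons, ← List.drop_eq_getElem_cons ha']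
      congr 1
      all_goals simp [List.drop_drop]

-- ===== VERDICT (by name: the statement is the Claim_ definition above) =====
theorem splitIntoFives_spec : Claim_equal_splitIntoFives := by
  intro message _
  unfold Spec_splitIntoFives splitIntoFives splitIntoFives_alt
  set l : List Char := (PySem.Str.replace message " " "").toList with hl
  simp only
  have hA := foldA l l.length 0 [] (by omega)
  have hB := blocks_eq l l.length 0 (by omega)
  have hJ := join_chunks l.length l 0 (by omega) (by omega)
  simp only [Nat.cast_zero] at hA hB
  simp only [List.drop_zero] at hA hB
  rw [hA, hB, hJ]
  simp
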